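-- pv_equiv track=rewrite | github.com/minsung37/Algorithm | etc/programmers/L2/L2_n^2 배열 자르기.py | solution
-- ===== SOURCE A (Python) =====
-- def solution(n, left, right):
--     result = []
--
--     for i in range(left, right + 1):
--         quotient, remainder = i // n, i % n
--         if quotient < remainder:
--             quotient, remainder = remainder, quotient
--         result.append(quotient + 1)
--
--     return result
-- ===== SOURCE B (Python) =====
-- def solution(n, left, right):
--     # Row-wise: values in row r are a plateau of r+1 (columns <= r) then an
--     # ascending tail c+1 (columns > r); clip columns of each row to [left, right].
--     result = []
--     for r in range(left // n, right // n + 1):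
--         c0 = max(left - r * n, 0)
--         c1 = min(right - r * n, n - 1)
--         plateau_end = min(c1, r)
--         if c0 <= plateau_end:
--             result.extend([r + 1] * (plateau_end - c0 + 1))
--         tail_start = max(c0, r + 1)
--         result.extend(range(tail_start + 1, c1 + 2))
--     return result
-- ===== Notes on version B (the rewrite author's own statement) =====
-- stated objective: faster
-- what changed: A's flat per-index divmod loop is replaced by a row-wise traversal: compute the row range left//n..right//n once and emit, per row, a replicated plateau [r+1]*k and an ascending range tail, clipped to [left,right] — bulk list construction replaces per-element divmod work.
-- outside the precondition, e.g. on solution(-3, 0, 2): A returns [1, 0, 0], B returns []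
import Mathlib
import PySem

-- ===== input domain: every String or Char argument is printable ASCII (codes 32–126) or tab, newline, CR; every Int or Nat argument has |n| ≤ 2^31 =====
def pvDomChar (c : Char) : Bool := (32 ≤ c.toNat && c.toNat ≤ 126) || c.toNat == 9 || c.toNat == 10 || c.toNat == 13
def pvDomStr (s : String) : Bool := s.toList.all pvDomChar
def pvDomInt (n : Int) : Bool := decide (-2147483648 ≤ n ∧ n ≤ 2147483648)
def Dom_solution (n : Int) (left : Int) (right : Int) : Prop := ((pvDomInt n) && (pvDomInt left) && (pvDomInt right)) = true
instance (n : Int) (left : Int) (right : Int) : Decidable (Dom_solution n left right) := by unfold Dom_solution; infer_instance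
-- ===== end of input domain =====

-- B replaces A's per-index divmod loop by a row-wise traversal (plateau + ascending tail per row, clipped to [left, right]); equal return values on the natural domain n ≥ 1.

-- ===== PORT A =====
def solution (n : Int) (left : Int) (right : Int) : List Int :=
  (PySem.List.pyRange left (right + 1) 1).foldl
    (fun result i =>
      let quotient := PySem.Int.floordiv i n
      let remainder := PySem.Int.mod i n
      let qr := if quotient < remainder then (remainder, quotient) else (quotient, remainder)
      result ++ [qr.1 + 1]) []

-- ===== PORT B =====
def solution_alt (n : Int) (left : Int) (right : Int) : List Int :=
  (PySem.List.pyRange (PySem.Int.floordiv left n) (PySem.Int.floordiv right n + 1) 1).foldl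
    (fun result r =>
      let c0 := max (left - r * n) 0
      let c1 := min (right - r * n) (n - 1)
      let plateauEnd := min c1 r
      let result := if c0 ≤ plateauEnd then result ++ List.replicate (plateauEnd - c0 + 1).toNat (r + 1) else result
      result ++ PySem.List.pyRange (max c0 (r + 1) + 1) (c1 + 2) 1) []

-- ===== PRECONDITION & SPEC =====
-- Pre_ restricts to the natural domain n ≥ 1 of an n×n array (it also excludes n = 0, where A raises
-- ZeroDivisionError); A does return values for negative n, but those floor-division results are not
-- part of the array-slicing task, and B's row-wise traversal does not reproduce them.
def Pre_solution (n : Int) (left : Int) (right : Int) : Prop := 1 ≤ n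
instance (n : Int) (left : Int) (right : Int) : Decidable (Pre_solution n left right) := by unfold Pre_solution; infer_instance
def pvWitness_solution : Int × Int × Int := (3, 2, 5)
def Spec_solution (n : Int) (left : Int) (right : Int) (out : List Int) : Prop := out = solution_alt n left right
instance (n : Int) (left : Int) (right : Int) (out : List Int) : Decidable (Spec_solution n left right out) := by unfold Spec_solution; infer_instance

-- ===== CLAIM (what is proved, stated in full; the proofs are below) =====
def Claim_equal_solution : Prop := ∀ (n : Int) (left : Int) (right : Int), Dom_solution n left right → Pre_solution n left right → Spec_solution n left right (solution n left right)

-- ===== LEMMAS AND PROOFS =====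

-- the value A computes at flat index i
def pvF (n i : Int) : Int := max (PySem.Int.floordiv i n) (PySem.Int.mod i n) + 1

-- the segment B emits for row q (exactly B's loop body, as a pure function)
def pvRowseg (n l r q : Int) : List Int :=
  (if max (l - q * n) 0 ≤ min (min (r - q * n) (n - 1)) q
   then List.replicate (min (min (r - q * n) (n - 1)) q - max (l - q * n) 0 + 1).toNat (q + 1)
   else [])
  ++ PySem.List.pyRange (max (max (l - q * n) 0) (q + 1) + 1) (min (r - q * n) (n - 1) + 2) 1

theorem pvFoldl_append_map (g : Int → Int) (xs : List Int) (init : List Int) :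
    xs.foldl (fun acc x => acc ++ [g x]) init = init ++ xs.map g := by
  induction xs generalizing init with
  | nil => simp
  | cons x xs ih => simp [ih]

theorem pvFoldl_append_flat (h : Int → List Int) (xs : List Int) (init : List Int) :
    xs.foldl (fun acc x => acc ++ h x) init = init ++ xs.flatMap h := by
  induction xs generalizing init with
  | nil => simp
  | cons x xs ih => simp [ih]

theorem pvFlatMap_congr (f g : Int → List Int) (xs : List Int)
    (h : ∀ x ∈ xs, f x = g x) : xs.flatMap f = xs.flatMap g := by
  induction xs with
  | nil => rfl
  | cons x xs ih =>
    simp only [List.flatMap_cons]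
    rw [h x (by simp), ih (fun y hy => h y (by simp [hy]))]

theorem pvA_eq_map (n l r : Int) :
    solution n l r = (PySem.List.pyRange l (r + 1) 1).map (pvF n) := by
  unfold solution
  rw [pvFoldl_append_map (fun i =>
    (if PySem.Int.floordiv i n < PySem.Int.mod i n
      then (PySem.Int.mod i n, PySem.Int.floordiv i n)
      else (PySem.Int.floordiv i n, PySem.Int.mod i n)).1 + 1)]
  simp only [List.nil_append]
  apply List.map_congr_left
  intro i _
  unfold pvF
  split_ifs with h <;> omega

theorem pvB_eq_flat (n l r : Int) :
    solution_alt n l r =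
      (PySem.List.pyRange (PySem.Int.floordiv l n) (PySem.Int.floordiv r n + 1) 1).flatMap
        (pvRowseg n l r) := by
  unfold solution_alt
  have hbody : (fun (result : List Int) (q : Int) =>
      let c0 := max (l - q * n) 0
      let c1 := min (r - q * n) (n - 1)
      let plateauEnd := min c1 q
      let result := if c0 ≤ plateauEnd then result ++ List.replicate (plateauEnd - c0 + 1).toNat (q + 1) else result
      result ++ PySem.List.pyRange (max c0 (q + 1) + 1) (c1 + 2) 1)
      = (fun (result : List Int) (q : Int) => result ++ pvRowseg n l r q) := by
    funext result q
    simp only [pvRowseg]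
    split_ifs <;> simp
  rw [hbody, pvFoldl_append_flat (pvRowseg n l r)]
  simp

theorem pvF_row (n q i m : Int) (hn : 0 < n) (hm : m = q * n)
    (h1 : m ≤ i) (h2 : i < m + n) : pvF n i = max q (i - m) + 1 := by
  subst hm
  have hq : PySem.Int.floordiv i n = q := by
    rw [PySem.Int.floordiv_eq_iff_of_pos hn]
    constructor
    · exact h1
    · have : (q + 1) * n = q * n + n := by ring
      omega
  have hmod := PySem.Int.floordiv_mul_add_mod i n
  rw [hq] at hmod
  unfold pvF
  rw [hq]
  omega

-- one clipped row: the values of A over the flat indices of row q that lie in [l, r]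
-- are exactly B's segment for row q
theorem pvRow_eq (n q l r m a b : Int) (hn : 0 < n) (hm : m = q * n)
    (ha : a = max l m) (hb : b = min (r + 1) (m + n)) :
    (PySem.List.pyRange a b 1).map (pvF n) = pvRowseg n l r q := by
  have hrs : pvRowseg n l r q =
      (if a - m ≤ min (b - 1 - m) q
        then List.replicate (min (b - 1 - m) q - (a - m) + 1).toNat (q + 1) else [])
      ++ PySem.List.pyRange (max (a - m) (q + 1) + 1) (b - 1 - m + 2) 1 := by
    simp only [pvRowseg, ← hm]
    have e0 : max (l - m) 0 = a - m := by omega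
    have e1 : min (r - m) (n - 1) = b - 1 - m := by omega
    rw [e0, e1]
  rw [hrs]
  by_cases hab : b ≤ a
  · rw [PySem.List.pyRange_one_eq_nil hab, PySem.List.pyRange_one_eq_nil (by omega)]
    rw [if_neg (by omega)]
    simp
  · rw [not_le] at hab
    have hcong : (PySem.List.pyRange a b 1).map (pvF n)
        = (PySem.List.pyRange a b 1).map (fun i => max q (i - m) + 1) := by
      apply List.map_congr_left
      intro i hi
      rw [PySem.List.mem_pyRange_one] at hi
      exact pvF_row n q i m hn hm (by omega) (by omega)
    rw [hcong]
    have hs1 : a ≤ min b (max a (m + q + 1)) := by omega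
    have hs2 : min b (max a (m + q + 1)) ≤ b := by omega
    rw [PySem.List.pyRange_one_append a (min b (max a (m + q + 1))) b hs1 hs2, List.map_append]
    congr 1
    · -- plateau part
      have hconst : (PySem.List.pyRange a (min b (max a (m + q + 1))) 1).map
            (fun i => max q (i - m) + 1)
          = (PySem.List.pyRange a (min b (max a (m + q + 1))) 1).map (fun _ => q + 1) := by
        apply List.map_congr_left
        intro i hi
        rw [PySem.List.mem_pyRange_one] at hi
        omega
      rw [hconst, List.map_const', PySem.List.length_pyRange_one]
      by_cases hc : a - m ≤ min (b - 1 - m) q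
      · rw [if_pos hc]
        congr 1
        omega
      · rw [if_neg hc]
        have : (min b (max a (m + q + 1)) - a).toNat = 0 := by omega
        rw [this, List.replicate_zero]
    · -- ascending tail part
      have htail : (PySem.List.pyRange (min b (max a (m + q + 1))) b 1).map
            (fun i => max q (i - m) + 1)
          = (PySem.List.pyRange (min b (max a (m + q + 1))) b 1).map (fun i => i - m + 1) := by
        apply List.map_congr_left
        intro i hi
        rw [PySem.List.mem_pyRange_one] at hi
        omega
      rw [htail]
      rw [PySem.List.pyRange_one, PySem.List.pyRange_one, List.map_map]
      by_cases hfit : max a (m + q + 1) ≤ b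
      · have e2 : (b - m + 1 - (max (a - m) (q + 1) + 1)) = b - min b (max a (m + q + 1)) := by omega
        have e3 : (b - 1 - m + 2) = b - m + 1 := by omega
        rw [e3, e2]
        apply List.map_congr_left
        intro k _
        simp only [Function.comp_apply]
        omega
      · have z1 : (b - min b (max a (m + q + 1))).toNat = 0 := by omega
        have z2 : (b - 1 - m + 2 - (max (a - m) (q + 1) + 1)).toNat = 0 := by omega
        rw [z1, z2]
        simp

theorem pvLt_of_fdiv_lt (n l r : Int) (hn : 0 < n)
    (h : PySem.Int.floordiv r n < PySem.Int.floordiv l n) : r < l := by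
  obtain ⟨hl1, hl2⟩ := (PySem.Int.floordiv_eq_iff_of_pos hn).mp
    (rfl : PySem.Int.floordiv l n = PySem.Int.floordiv l n)
  obtain ⟨hr1, hr2⟩ := (PySem.Int.floordiv_eq_iff_of_pos hn).mp
    (rfl : PySem.Int.floordiv r n = PySem.Int.floordiv r n)
  have : (PySem.Int.floordiv r n + 1) * n ≤ PySem.Int.floordiv l n * n :=
    mul_le_mul_of_nonneg_right (by omega) (le_of_lt hn)
  linarith

theorem pvMain_aux (n : Int) (hn : 0 < n) : ∀ (k : Nat) (l r : Int),
    PySem.Int.floordiv r n - PySem.Int.floordiv l n ≤ (k : Int) →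
    (PySem.List.pyRange l (r + 1) 1).map (pvF n)
      = (PySem.List.pyRange (PySem.Int.floordiv l n) (PySem.Int.floordiv r n + 1) 1).flatMap
          (pvRowseg n l r) := by
  intro k
  induction k with
  | zero =>
    intro l r hk
    obtain ⟨hl1, hl2⟩ := (PySem.Int.floordiv_eq_iff_of_pos hn).mp
      (rfl : PySem.Int.floordiv l n = PySem.Int.floordiv l n)
    obtain ⟨hr1, hr2⟩ := (PySem.Int.floordiv_eq_iff_of_pos hn).mp
      (rfl : PySem.Int.floordiv r n = PySem.Int.floordiv r n)
    rcases lt_or_eq_of_le hk with h | h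
    · -- R < q : both sides empty
      have hrl : r < l := pvLt_of_fdiv_lt n l r hn (by omega)
      rw [PySem.List.pyRange_one_eq_nil (by omega), PySem.List.pyRange_one_eq_nil (by omega)]
      simp
    · -- R = q : a single (clipped) row
      have heq : PySem.Int.floordiv r n = PySem.Int.floordiv l n := by omega
      rw [heq, PySem.List.pyRange_one_singleton]
      simp only [List.flatMap_cons, List.flatMap_nil, List.append_nil]
      apply pvRow_eq n (PySem.Int.floordiv l n) l r (PySem.Int.floordiv l n * n) l (r + 1)
        hn rfl
      · rw [max_eq_left hl1]
      · rw [min_eq_left]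
        rw [← heq]
        have : (PySem.Int.floordiv r n + 1) * n = PySem.Int.floordiv r n * n + n := by ring
        linarith
  | succ k ih =>
    intro l r hk
    obtain ⟨hl1, hl2⟩ := (PySem.Int.floordiv_eq_iff_of_pos hn).mp
      (rfl : PySem.Int.floordiv l n = PySem.Int.floordiv l n)
    obtain ⟨hr1, hr2⟩ := (PySem.Int.floordiv_eq_iff_of_pos hn).mp
      (rfl : PySem.Int.floordiv r n = PySem.Int.floordiv r n)
    rcases lt_trichotomy (PySem.Int.floordiv r n) (PySem.Int.floordiv l n) with h | h | h
    · have hrl : r < l := pvLt_of_fdiv_lt n l r hn h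
      rw [PySem.List.pyRange_one_eq_nil (by omega), PySem.List.pyRange_one_eq_nil (by omega)]
      simp
    · rw [h, PySem.List.pyRange_one_singleton]
      simp only [List.flatMap_cons, List.flatMap_nil, List.append_nil]
      apply pvRow_eq n (PySem.Int.floordiv l n) l r (PySem.Int.floordiv l n * n) l (r + 1)
        hn rfl
      · rw [max_eq_left hl1]
      · rw [min_eq_left]
        rw [← h]
        have : (PySem.Int.floordiv r n + 1) * n = PySem.Int.floordiv r n * n + n := by ring
        linarith
    · -- more than one row: split off the first row at m = (q+1)*n
      have hm2 : (PySem.Int.floordiv l n + 1) * n ≤ PySem.Int.floordiv r n * n :=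
        mul_le_mul_of_nonneg_right (by omega) (le_of_lt hn)
      have hsplit : l ≤ (PySem.Int.floordiv l n + 1) * n := le_of_lt hl2
      have hsplit2 : (PySem.Int.floordiv l n + 1) * n ≤ r + 1 := by linarith
      rw [PySem.List.pyRange_one_append l ((PySem.Int.floordiv l n + 1) * n) (r + 1) hsplit hsplit2,
        List.map_append]
      have hfdm : PySem.Int.floordiv ((PySem.Int.floordiv l n + 1) * n) n
          = PySem.Int.floordiv l n + 1 := by
        rw [PySem.Int.floordiv_eq_iff_of_pos hn]
        constructor
        · exact le_refl _
        · exact mul_lt_mul_of_pos_right (by omega) hn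
      have hih := ih ((PySem.Int.floordiv l n + 1) * n) r (by rw [hfdm]; omega)
      rw [hfdm] at hih
      rw [hih]
      have hcong : (PySem.List.pyRange (PySem.Int.floordiv l n + 1)
            (PySem.Int.floordiv r n + 1) 1).flatMap
            (pvRowseg n ((PySem.Int.floordiv l n + 1) * n) r)
          = (PySem.List.pyRange (PySem.Int.floordiv l n + 1)
            (PySem.Int.floordiv r n + 1) 1).flatMap (pvRowseg n l r) := by
        apply pvFlatMap_congr
        intro q' hq'
        rw [PySem.List.mem_pyRange_one] at hq'
        have hq'n : (PySem.Int.floordiv l n + 1) * n ≤ q' * n :=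
          mul_le_mul_of_nonneg_right (by omega) (le_of_lt hn)
        simp only [pvRowseg]
        rw [max_eq_right (show (PySem.Int.floordiv l n + 1) * n - q' * n ≤ 0 by linarith),
          max_eq_right (show l - q' * n ≤ 0 by linarith)]
      rw [hcong]
      conv_rhs => rw [PySem.List.pyRange_one_cons (show PySem.Int.floordiv l n
        < PySem.Int.floordiv r n + 1 by omega), List.flatMap_cons]
      congr 1
      apply pvRow_eq n (PySem.Int.floordiv l n) l r (PySem.Int.floordiv l n * n) l
        ((PySem.Int.floordiv l n + 1) * n) hn rfl
      · rw [max_eq_left hl1]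
      · rw [min_eq_right (by linarith)]
        ring

-- ===== VERDICT (by name: the statement is the Claim_ definition above) =====
theorem solution_spec : Claim_equal_solution := by
  intro n l r _ hpre
  unfold Spec_solution
  have hn : 0 < n := hpre
  rw [pvA_eq_map, pvB_eq_flat]
  exact pvMain_aux n hn (PySem.Int.floordiv r n - PySem.Int.floordiv l n).toNat l r
    (Int.self_le_toNat _)
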